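-- pv_equiv track=rewrite | github.com/corollari/BaaL | code/huffman.py | hex2asm
-- ===== SOURCE A (Python) =====
-- def hex2asm(hexCode):
--     asm="encoded: db "
--     comma=False
--     for c in hexCode:
--         asm+=c
--         if comma:
--             asm+=','
--         comma = not comma
--     return asm
-- ===== SOURCE B (Python) =====
-- def hex2asm(hexCode):
--     pieces = ["encoded: db "]
--     i = 0
--     n = len(hexCode)
--     while i + 2 <= n:
--         pieces.append(hexCode[i:i+2] + ',')
--         i += 2
--     pieces.append(hexCode[i:])
--     return "".join(pieces)
-- ===== Notes on version B (the rewrite author's own statement) =====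
-- stated objective: alternative
-- what changed: Replaced the per-character loop with a toggled comma flag by an index loop over two-character slices: each complete pair is appended with a trailing comma and the lone leftover char (if any) without one, joined at the end.
import Mathlib
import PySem

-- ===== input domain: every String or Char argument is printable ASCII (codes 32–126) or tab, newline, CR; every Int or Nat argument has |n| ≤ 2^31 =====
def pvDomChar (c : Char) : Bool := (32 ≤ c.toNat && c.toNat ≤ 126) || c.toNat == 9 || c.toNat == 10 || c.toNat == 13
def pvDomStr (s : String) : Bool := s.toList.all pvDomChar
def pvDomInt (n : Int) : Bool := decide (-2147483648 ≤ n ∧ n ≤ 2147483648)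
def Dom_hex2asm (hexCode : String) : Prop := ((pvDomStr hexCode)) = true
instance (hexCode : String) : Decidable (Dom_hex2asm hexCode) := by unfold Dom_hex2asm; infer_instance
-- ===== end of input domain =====

-- B walks the string two characters at a time by index slices (comma after each
-- complete pair, lone leftover char bare) instead of A's per-character toggle flag.

-- ===== PORT A =====
-- A's loop over the characters: asm += c; if comma: asm += ','; comma = not comma.
def hex2asmLoop (cs : List Char) (asm : List Char) (comma : Bool) : List Char :=
  match cs with
  | [] => asm
  | c :: rest =>
      let asm1 := asm ++ [c]
      let asm2 := if comma then asm1 ++ [','] else asm1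
      hex2asmLoop rest asm2 (!comma)

def hex2asm (hexCode : String) : String :=
  String.mk (hex2asmLoop hexCode.toList "encoded: db ".toList false)

-- ===== PORT B =====
-- while i + 2 <= n: pieces.append(hexCode[i:i+2] + ','); i += 2  — then pieces.append(hexCode[i:])
def hex2asmChunks (cs : List Char) (n i : Nat) : List (List Char) :=
  if i + 2 ≤ n then
    (PySem.List.slice cs (some (i : Int)) (some ((i : Int) + 2)) ++ [',']) ::
      hex2asmChunks cs n (i + 2)
  else
    [PySem.List.slice cs (some (i : Int)) none]
termination_by n - i

-- "".join(pieces) with pieces = ["encoded: db "] ++ chunks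
def hex2asm_alt (hexCode : String) : String :=
  String.mk (("encoded: db ".toList :: hex2asmChunks hexCode.toList hexCode.toList.length 0).flatten)

-- ===== PRECONDITION & SPEC =====
def Spec_hex2asm (hexCode : String) (out : String) : Prop := out = hex2asm_alt hexCode
instance (hexCode : String) (out : String) : Decidable (Spec_hex2asm hexCode out) := by unfold Spec_hex2asm; infer_instance

-- ===== CLAIM (what is proved, stated in full; the proofs are below) =====
def Claim_equal_hex2asm : Prop := ∀ (hexCode : String), Dom_hex2asm hexCode → Spec_hex2asm hexCode (hex2asm hexCode)

-- ===== LEMMAS AND PROOFS =====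

-- proof-only normal form: the pairwise comma'd list
def pairsNF : List Char → List Char
  | a :: b :: rest => a :: b :: ',' :: pairsNF rest
  | l => l

theorem hex2asmLoop_eq_pairsNF (cs : List Char) : ∀ (asm : List Char),
    hex2asmLoop cs asm false = asm ++ pairsNF cs := by
  induction cs using pairsNF.induct with
  | case1 a b rest ih =>
      intro asm
      simp [hex2asmLoop, pairsNF, ih]
  | case2 l h =>
      intro asm
      match l, h with
      | [], _ => simp [hex2asmLoop, pairsNF]
      | [a], _ => simp [hex2asmLoop, pairsNF]
      | a :: b :: rest, h => exact absurd rfl (h a b rest)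

theorem hex2asmChunks_flatten (cs : List Char) (n i : Nat) (hn : n = cs.length) :
    (hex2asmChunks cs n i).flatten = pairsNF (cs.drop i) := by
  induction i using hex2asmChunks.induct (n := n) with
  | case1 i h ih =>
      rw [hex2asmChunks]
      simp only [h, if_true, List.flatten_cons, ih]
      have hcast : ((i : Int) + 2) = ((i + 2 : Nat) : Int) := by push_cast; ring
      rw [hcast, PySem.List.slice_natCast]
      have hlen : 2 ≤ (cs.drop i).length := by
        simp [List.length_drop]; omega
      match hd : cs.drop i, hlen with
      | a :: b :: rest, _ =>
        have : cs.drop (i + 2) = rest := by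
          have h2 : cs.drop (i + 2) = (cs.drop i).drop 2 := by
            rw [List.drop_drop, Nat.add_comm]
          rw [h2, hd]; rfl
        simp [this, pairsNF]
  | case2 i h =>
      rw [hex2asmChunks]
      simp only [h, if_false, List.flatten_cons, List.flatten_nil, List.append_nil]
      rw [PySem.List.slice_from_natCast]
      have hlen : (cs.drop i).length ≤ 1 := by
        simp [List.length_drop]; omega
      match hd : cs.drop i, hlen with
      | [], _ => simp [pairsNF]
      | [a], _ => simp [pairsNF]

-- ===== VERDICT (by name: the statement is the Claim_ definition above) =====
theorem hex2asm_spec : Claim_equal_hex2asm := by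
  intro hexCode _
  unfold Spec_hex2asm hex2asm hex2asm_alt
  rw [hex2asmLoop_eq_pairsNF, List.flatten_cons,
      hex2asmChunks_flatten hexCode.toList _ 0 rfl, List.drop_zero]
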